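/- GENERATED by mk_final_copies.py from the proof of the farm's unit `start_decoder.F4e` (farm:start_decoder.F4e.1: Proof.lean) as the
   re-elaboration sweep compiled it — do not edit. -/
import Asan.CheckWalk
import Vorbis.Spec.Reader
import Vorbis.Spec.Units.start_decoder_F4e

open X86 X86.User Asan Vorbis Vorbis.Spec Vorbis.Spec.StartDecoder

set_option maxRecDepth 4000
set_option maxHeartbeats 4000000

namespace Vorbis.Spec.start_decoder_F4e

/-- The word stored by `sub eax,1 ; mov [rsp+30H],ax ; movzx eax,word [rsp+30H] ; mov [..],ax` for a `get_bits(f, 8)` result `x < 256`: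
`x − 1` modulo `2 ^ 16`. -/
theorem f4e_word (x : BitVec 32) (hx : x.toNat < 256) :
    (BitVec.setWidth 16 (BitVec.zeroExtend 32 (BitVec.ofNat 16 ((BitVec.setWidth 16 (x - 1#32)).toNat % 65536)))).toNat
      = (x.toNat + 65535) % 65536 := by
  simp only [BitVec.zeroExtend, BitVec.toNat_setWidth, BitVec.toNat_ofNat, BitVec.toNat_sub]
  omega

/-- The signed 16-bit reading of that word is `x − 1 ∈ [−1, 254]`. -/
theorem f4e_sint (n : Nat) (hn : n < 256) : sint16 ((n + 65535) % 65536) = (n : Int) - 1 := by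
  rcases sint16_cases ((n + 65535) % 65536) with ⟨c1, c2⟩ | ⟨c1, c2⟩
  · rw [c2]
    omega
  · rw [c2]
    omega

/-- `movsx r15d,ax` of that word, as a signed number: `x − 1`. -/
theorem f4e_sext (x : BitVec 32) (hx : x.toNat < 256) :
    (BitVec.signExtend 32 (BitVec.setWidth 16 (BitVec.zeroExtend 32
      (BitVec.ofNat 16 ((BitVec.setWidth 16 (x - 1#32)).toNat % 65536))))).toInt = (x.toNat : Int) - 1 := by
  rw [BitVec.toInt_signExtend_of_le (by decide)]
  rw [BitVec.toInt_eq_toNat_cond, f4e_word x hx]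
  split <;> omega

/-- **Segment F4e of `start_decoder`** (`cut211` = 0x115513, the return of `get_bits(f, 8)`): `sub eax,1`, the spill to `[rsp+30H]`, the
checked word store `subclass_books[j][k] = (int16)(eax − 1)` (check site `Floor.site`, offset `52H + 16j + 2k`), the checked load of
`f->codebook_count` and the SIGNED test (`f4e_sext`). In range: `add r14d,1 ; jmp loop20`: the book head with `k + 1` — no reader was
called, so ONE `Floor.carry_quiet` (windows: the check calls' return addresses, the spill, the word), then `Floor.floor4_carry`,
`Floor.classes_row`, `F4.classCur_carry`, and `BooksUpTo.step` with the word read back. Out of range: `error(f, 20)`, `jmp 113b22`: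
`Floor.carry_quiet` over error's word too, `Floor.atERR`. -/
theorem f4e_walk {Lay : Layout} (hLay : Lay.hi = 0x1000000) {μ : Microarch} (hμ : UserX.MicroOK μ) {u₀ : State}
    (hcode : HasCodeNat Lay u₀ Vorbis.L.start_decoder.entry Vorbis.Code.code_start_decoder.nat Vorbis.L.start_decoder.size)
    (hst2 : Asan.SmallCheck Lay μ Vorbis.WayInv (Vorbis.CodeOK u₀) [.rax, .rcx, .rdx] 2 Vorbis.L.__asan_store2_noabort.entry)
    (hld4 : Asan.SmallCheck Lay μ Vorbis.WayInv (Vorbis.CodeOK u₀) [.rax, .rcx, .rdx] 4 Vorbis.L.__asan_load4_noabort.entry)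
    (herr : ∀ (others : List Obj) (frames : List (Nat × FrameLayout)),
      Calls Lay μ Vorbis.WayInv (Vorbis.conv u₀) Vorbis.L.error.entry (Vorbis.Spec.error.spec others frames))
    {g : Ghost} {i : Nat} {A5 : Arena} {A : Arena × List Obj} {mc : Int} {j k : Nat} {v : State}
    (hat : BookMid u₀ g i A5 A mc j k v) :
    ReachVia Lay μ WayInv v (fun w => AtBookHead u₀ g i A5 A mc j (k + 1) w ∨ AtERR u₀ g w) := by
  have hloop := hat.in4.loop
  have hlt := hat.in4.cur.lt
  have hfr := hloop.frame
  have he := hfr.entry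
  v_entry he
  simp only [depth] at he_room he_stack
  have herr' := herr A.2 g.frames'
  have hgeo := Floor.geo hloop hlt
  obtain ⟨r8, rlo, rhi, ra, flo, fhi, fstack, farena, flog, fc1, fc64, ilt, gdef, blo, bhi, btext, bstack, bdata, blog⟩ := hgeo
  have hmc2 := hat.in4.cur.mc_hi
  have hj := hat.j_le
  have hj31 : j < 2 ^ 31 := by omega
  have hk8 : k < 8 := by
    have h1 := hat.k_lt
    have h2 := two_pow_le_8 _ hat.cur.sub
    omega
  have hk31 : k < 2 ^ 31 := by omega
  obtain ⟨R, hR⟩ : ∃ R, R = g.R := ⟨_, rfl⟩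
  obtain ⟨f, hfe⟩ : ∃ f, f = g.f := ⟨_, rfl⟩
  obtain ⟨gi, hgi⟩ : ∃ gi, gi = floorAt g v.mem i := ⟨_, rfl⟩
  obtain ⟨z, hz⟩ : ∃ z, v.reg .rax = z := ⟨_, rfl⟩
  have hz8 : z.toNat < 256 := by
    rw [← hz]
    exact hat.rax
  obtain ⟨cb, hcb⟩ : ∃ cb, cb = v.mem.u32 (g.f + 160) := ⟨_, rfl⟩
  have w_rip := hfr.rip
  have c_rsp := hfr.rsp
  have c_rbp := hloop.rbp
  have c_rbx := hat.in4.rbx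
  have c_r12 : v.reg .r12 = UInt64.ofNat j := hat.r12
  have c_r14 : v.reg .r14 = UInt64.ofNat k := hat.r14
  have c_rax := hz
  rw [← hR] at c_rsp r8 rlo rhi ra fstack
  rw [← hfe] at c_rbp flo fhi fstack farena flog hcb
  rw [← hgi] at c_rbx gdef
  simp only [addr] at c_rsp c_rbp c_rbx
  have hld : v.mem.readLE (UInt64.ofNat f + 160) 4 = cb := by
    have ea : (UInt64.ofNat f + 160 : Word).toNat = f + 160 := by
      u_omega
    rw [hcb]
    unfold Mem.u32
    rw [← eq_addr _ _ ea]
  have hcbc : stb_vorbis.codebook_count v.mem g.f = (BitVec.ofNat 32 cb).toInt := by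
    rw [hcb, ← hfe, Mem.toInt_ofNat32_u32]
    simp only [vacc, voff]
  have hx8 : (Word.part .w32 z).toNat < 256 := by
    rw [Vorbis.toNat_part32]
    omega
  have w_eq : Mem.EqOn Vorbis.L.textLo Vorbis.L.textHi u₀.mem v.mem := hfr.code
  have hdf : v.flags .df = false := (show abiInv _ from hfr.inv).1
  have hmx : v.mxcsr &&& 0x1F80 = 0x1F80 := (show abiInv _ from hfr.inv).2
  have hsse := Vorbis.sseOK_of_abiInv hfr.inv
  -- THE SCALED ADDRESS AS A NUMBER, ONCE, BEFORE THE WALK: the word's address comes out of `lea r15,[rax+rdx*8+28H] ; lea rax,[r15+r15] ;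
  -- lea rdi,[rbx+rax+2]` as `gi + (k + j * 8 + 40) * 2 + 2` over words. Every disjointness side goal about it (a read through this store, the
  -- code span, `v_untouched`, `u_same`) is a disjunction whose `toNat` has five nested `% 2 ^ 64` and a `* 2`, on which `omega` gives up in the
  -- walk's large context. With this equation in the context `u_omega` sees the address as the linear term on the right.
  have hea : (UInt64.ofNat gi + (UInt64.ofNat k + UInt64.ofNat j * 8 + 40) * 2 + 2 : Word).toNat
      = gi + 82 + 2 * (8 * j + k) := by
    u_omega
  u_walk hcode [hμ.vendor, Vorbis.Spec.cnt32_sext j hj31, Vorbis.Spec.cnt32_sext k hk31, Vorbis.Spec.cnt32_succ k (by omega)] until [Vorbis.L.start_decoder.loop20, Vorbis.L.start_decoder.cut4] span [Vorbis.L.textLo, Vorbis.L.textHi] side (v_side)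
  case check_11552f =>
    have hun : ShadowUntouched v.mem s_11552f.mem := by v_untouched
    have hs := Floor.site hloop hlt (0x52 + 16 * j + 2 * k) 2 (by omega) (by simp only [Off.sizeof.Floor]; omega)
    refine Vorbis.Spec.check_site hfr.shadow hun hs ?_
    rw [← hgi]
    u_omega
  case check_11554a =>
    have hun : ShadowUntouched v.mem s_11554a.mem := by v_untouched
    have hl : LiveIn A.2 g.frames' g.f Off.sizeof.stb_vorbis := hloop.hand.obj.mono (P2.callers_live g A.2)
    simp only [Off.sizeof.stb_vorbis] at hl
    rw [← hfe] at hl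
    exact hl.accSmall hfr.shadow hun _ 4 (by decide) (by u_omega) (by u_omega)
  case call_inv => v_inv
  case pre_1155b4 =>
    have hun : ShadowUntouched v.mem s_1155b4.mem := by v_untouched
    have hrdi : (s_1155b4.reg .rdi).toNat = g.f := by
      rw [w_rdi, hfe]
      exact toNat_addr g.f (by omega)
    refine Floor.error_pre hloop ?_ hun hrdi
    rw [w_rsp, ← hR]
    u_omega
  · -- the return of `error`: 0x1155b9 `jmp 113b22`
    obtain ⟨hrax0, hpu, _⟩ := w_post
    v_after_call w_rsp_1155b4 w_mem_1155b4
    simp only [w_rdi_1155b4] at w_same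
    have hun0 : ShadowUntouched v.mem s_1155b4.mem := by
      rw [w_mem_1155b4]
      v_untouched
    have hun : ShadowUntouched v.mem s_1155b4r.mem := Mem.EqOn.trans hun0 hpu
    have hsame : Mem.SameExcept [⟨R - 408, R⟩, ⟨R + 0x30, R + 0x32⟩, ⟨f + 140, f + 144⟩,
        ⟨gi + 0x52 + 16 * j + 2 * k, gi + 0x54 + 16 * j + 2 * k⟩] v.mem s_1155b4r.mem := by
      u_same
    have w_rax : s_1155b4r.reg .rax = 0 := hrax0
    u_walk hcode [hμ.vendor] until [Vorbis.L.start_decoder.cut4] span [Vorbis.L.textLo, Vorbis.L.textHi] side (v_side)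
    rw [hR, hfe, hgi] at hsame
    rw [← w_mem] at hsame hun
    have hq : ∀ w, w ∈ [(⟨g.R - 408, g.R⟩ : Span), ⟨g.R + 0x30, g.R + 0x32⟩, ⟨g.f + 140, g.f + 144⟩,
        ⟨floorAt g v.mem i + 0x52 + 16 * j + 2 * k, floorAt g v.mem i + 0x54 + 16 * j + 2 * k⟩] →
        Floor.Quiet g (floorAt g v.mem i) (0x52 + 16 * j + 2 * k) (0x54 + 16 * j + 2 * k) w := by
      intro w hw
      simp only [List.mem_cons, List.mem_nil_iff, or_false] at hw
      unfold Floor.Quiet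
      rcases hw with rfl | rfl | rfl | rfl
      all_goals simp only []
      all_goals omega
    have hinv : abiInv s_1155b9 := by
      refine ⟨?_, ?_⟩
      · rw [w_flags]
        exact w_df
      · rw [w_mxcsr]
        exact w_mx
    have e1 : s_1155b9.reg .rsp = addr g.R := by
      rw [w_rsp, hR]
      rfl
    have e2 : s_1155b9.reg .rbp = addr g.f := by
      rw [w_kept .rbp rfl, c_rbp, hfe]
      rfl
    have hloop' := Floor.carry_quiet hloop hlt (by omega) w_rip e1 e2 hinv w_eq hsame hq hun
    refine ReachVia.done (Or.inr (Floor.atERR hloop' ?_))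
    rw [w_rax]
    rfl
  · -- the back edge: the book head with `k + 1`
    rw [f4e_sext _ hx8, Vorbis.toNat_part32, Nat.mod_eq_of_lt (by omega : z.toNat < 2 ^ 32), ← hcbc] at hbr_115556
    have hun : ShadowUntouched v.mem s_11555c.mem := by v_untouched
    -- the stored word, read back
    have ea : (UInt64.ofNat gi + (UInt64.ofNat k + UInt64.ofNat j * 8 + 40) * 2 + 2 : Word).toNat
        = gi + 82 + 2 * (8 * j + k) := by
      u_omega
    have hw0 : s_11555c.mem.readLE (UInt64.ofNat gi + (UInt64.ofNat k + UInt64.ofNat j * 8 + 40) * 2 + 2) 2 =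
        (z.toNat + 65535) % 65536 := by
      have e := f4e_word _ hx8
      rw [Vorbis.toNat_part32, Nat.mod_eq_of_lt (by omega : z.toNat < 2 ^ 32)] at e
      rw [← e, w_mem]
      rw [X86.User.Mem.readLE_writeLE_disjoint_noWrap _ _ _ _ _ _ ?_ ?_ ?_]
      · rw [X86.User.Mem.readLE_writeLE_same _ _ _ _ (by decide), e]
        omega
      · u_frame_side
      · u_frame_side
      · rw [ea]
        have t : (UInt64.ofNat R - 8 : Word).toNat = R - 8 := by
          u_omega
        rw [t]
        omega
    have hsame : Mem.SameExcept [⟨R - 408, R⟩, ⟨R + 0x30, R + 0x32⟩,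
        ⟨gi + 0x52 + 16 * j + 2 * k, gi + 0x54 + 16 * j + 2 * k⟩] v.mem s_11555c.mem := by
      u_same
    rw [hR, hgi] at hsame
    have hq : ∀ w, w ∈ [(⟨g.R - 408, g.R⟩ : Span), ⟨g.R + 0x30, g.R + 0x32⟩,
        ⟨floorAt g v.mem i + 0x52 + 16 * j + 2 * k, floorAt g v.mem i + 0x54 + 16 * j + 2 * k⟩] →
        Floor.Quiet g (floorAt g v.mem i) (0x52 + 16 * j + 2 * k) (0x54 + 16 * j + 2 * k) w := by
      intro w hw
      simp only [List.mem_cons, List.mem_nil_iff, or_false] at hw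
      unfold Floor.Quiet
      rcases hw with rfl | rfl | rfl
      all_goals simp only []
      all_goals omega
    have hws := fun w hw => (hq w hw).win
    have hinv : abiInv s_11555c := by
      refine ⟨?_, ?_⟩
      · rw [w_flags]
        simp only [X86.User.df_setStatus]
        exact w_df_11554a
      · rw [w_mxcsr]
        exact hmx
    have e1 : s_11555c.reg .rsp = addr g.R := by
      rw [w_rsp, hR]
      rfl
    have e2 : s_11555c.reg .rbp = addr g.f := by
      rw [w_kept .rbp rfl, c_rbp, hfe]
      rfl
    have hloop' := Floor.carry_quiet hloop hlt (by omega) w_rip e1 e2 hinv w_eq hsame hq hun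
    have hgeo := Floor.geo hloop hlt
    obtain ⟨eG, _, ecc, _⟩ := Floor.fields_same hgeo hsame hws (by omega)
    have hcur' := Floor.floor4_carry hgeo hat.in4.cur (by omega) (by omega) (by omega) hsame hws
    have hcl' := Floor.classes_row hgeo hat.classes (by omega) (Or.inr (Or.inr (Or.inr (by omega)))) (by omega) (by omega)
      hsame (fun w hw => (hws w hw).winT)
    have hcc' := F4.classCur_carry hgeo hat.cur (by omega) (Nat.le_refl _) (by omega) (by omega) hsame
      (fun w hw => (hws w hw).winT)
    have EG := Floor.elem_below hgeo hsame (fun w hw => (hws w hw).winT (i := i)) (by omega) (by omega)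
    rw [← hgi] at EG hcc'
    have es : Floor1.class_subclasses s_11555c.mem gi j = Floor1.class_subclasses v.mem gi j := by
      simp only [vacc, voff]
      exact EG.u8 _ (by omega) (by omega) (by omega)
    -- the new book
    have enew : Floor1.subclass_books s_11555c.mem gi j k = (z.toNat : Int) - 1 := by
      simp only [vacc, voff]
      unfold Mem.i16 Mem.u16
      rw [← eq_addr _ _ ea, hw0]
      exact f4e_sint _ hz8
    have hkl := hat.k_lt
    rw [← hgi] at hkl
    refine ReachVia.done (Or.inl ⟨⟨hloop', ?_, ?_, hcur'⟩, ?_, ?_, hj, ?_, ?_⟩)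
    · rw [eG, w_kept .rbx rfl]
      exact hat.in4.rbx
    · rw [w_kept .r13 rfl]
      exact hat.in4.r13
    · rw [w_kept .r12 rfl]
      exact hat.r12
    · exact w_r14
    · rw [eG, ecc]
      exact hcl'
    · rw [eG, ecc, ← hgi]
      refine ⟨hcc'.dim, hcc'.sub, hcc'.master, ?_, ?_⟩
      · refine BooksUpTo.step hcc'.books (fun _ _ => rfl) ?_
        rw [enew]
        omega
      · rw [es]
        omega

end Vorbis.Spec.start_decoder_F4e

/-- The unit `start_decoder.F4e`: the statement is the claim `SegF4e`. -/
theorem Vorbis.Spec.Worked.start_decoder_F4e_ok : Vorbis.Spec.start_decoder_F4e.Statement := by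
  intro Lay hLay μ hμ u₀ hcode hst2 hld4 herr g i A5 A mc j k v hat
  exact Vorbis.Spec.start_decoder_F4e.f4e_walk hLay hμ hcode hst2 hld4 herr hat
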